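-- pv_equiv track=rewrite | github.com/cerisara/md2slides | makehtml.py | strong
-- ===== SOURCE A (Python) =====
-- def strong(s):
--   i=0
--   ss=""
--   while True:
--     j=s.find('*',i)
--     if j<0: break
--     if j>0 and s[j-1]=='\\':
--         ss+=s[i:j-1]+'*'
--         i=j+1
--     else:
--         k=s.find('*',j+1)
--         if k<0: break
--         ss+=s[i:j]+"<strong>"+s[j+1:k]+"</strong>"
--         i=k+1
--   ss+=s[i:]
--   return ss
-- ===== SOURCE B (Python) =====
-- def strong(s):
--     # Tokenize once on the star separator and consume the segment list left to right,
--     # instead of scanning with repeated find() calls.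
--     parts = s.split('*')
--     out = []
--     head = parts[0]
--     i = 1
--     n = len(parts)
--     while i < n:
--         if head.endswith('\\'):
--             # the separating star after `head` was escaped: fold it back in
--             head = head[:-1] + '*' + parts[i]
--             i += 1
--         elif i == n - 1:
--             # a lone opening star with no closing star: emit verbatim
--             head = head + '*' + parts[i]
--             i += 1
--         else:
--             out.append(head + '<strong>' + parts[i] + '</strong>')
--             head = parts[i + 1]
--             i += 2
--     out.append(head)
--     return ''.join(out)
-- ===== Notes on version B (the rewrite author's own statement) =====
-- stated objective: alternative
-- what changed: Replaces A's index-based while loop of repeated str.find calls with manual escape/closing-star scanning by tokenizing the string once with str.split on the star separator and consuming the resulting segment list left to right (folding escaped separators back into the current head, pairing the remaining separators as <strong> boundaries).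
import Mathlib
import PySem

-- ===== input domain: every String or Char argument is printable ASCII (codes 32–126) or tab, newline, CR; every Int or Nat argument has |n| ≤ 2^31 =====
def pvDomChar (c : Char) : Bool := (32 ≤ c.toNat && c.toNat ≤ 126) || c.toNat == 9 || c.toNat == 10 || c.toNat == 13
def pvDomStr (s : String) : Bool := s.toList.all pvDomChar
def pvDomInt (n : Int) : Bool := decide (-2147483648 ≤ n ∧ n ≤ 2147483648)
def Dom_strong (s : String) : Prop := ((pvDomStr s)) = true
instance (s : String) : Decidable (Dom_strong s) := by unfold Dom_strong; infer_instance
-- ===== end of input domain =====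

-- B tokenizes the string once with str.split on the star separator and consumes the segment
-- list, instead of A's index-based while/find scan; same return value, different algorithm.

-- findFrom/find on the needle '*', in terms of List.idxOf (used for the port's termination and below)
theorem pvFindGo_star (t : List Char) : ∀ (k : Nat),
    PySem.Chars.find.go ['*'] t k = if '*' ∈ t then ((k : Int) + List.idxOf '*' t) else -1 := by
  induction t with
  | nil => intro k; simp [PySem.Chars.find.go]
  | cons c rest ih =>
    intro k
    by_cases hc : c = '*'
    · subst hc
      simp [PySem.Chars.find.go, List.isPrefixOf]
    · rw [show PySem.Chars.find.go ['*'] (c :: rest) k = PySem.Chars.find.go ['*'] rest (k + 1) from by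
        simp [PySem.Chars.find.go, List.isPrefixOf, Ne.symm hc]]
      rw [ih (k + 1)]
      by_cases hm : '*' ∈ rest
      · simp only [if_true, List.mem_cons, hm, or_true, List.idxOf_cons,
          show (c == '*') = false by simp [hc], cond_false]
        push_cast; ring
      · have hm' : ¬ '*' ∈ c :: rest := by simp [hm, Ne.symm hc]
        simp [hm, hm']

theorem pvFind_star (t : List Char) :
    PySem.Chars.find t ['*'] = if '*' ∈ t then (List.idxOf '*' t : Int) else -1 := by
  unfold PySem.Chars.find
  rw [pvFindGo_star t 0]
  simp

theorem pvFindFrom_star (cs : List Char) (st : Nat) (hst : st ≤ cs.length) :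
    PySem.Chars.findFrom cs ['*'] (st : Int) none =
      if '*' ∈ cs.drop st then ((st : Int) + List.idxOf '*' (cs.drop st)) else -1 := by
  rw [PySem.Chars.findFrom_natCast cs ['*'] st hst, pvFind_star]
  by_cases hm : '*' ∈ cs.drop st
  · simp only [hm, if_true]
    rw [if_neg (by omega)]
  · simp [hm]

theorem pvFindFrom_star_none (cs : List Char) (st : Nat) (hst : cs.length < st) :
    PySem.Chars.findFrom cs ['*'] (st : Int) none = -1 := by
  have h1 : ¬ ((st : Int) < 0) := by omega
  have h2 : (cs.length : Int) < (st : Int) := by exact_mod_cast hst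
  simp only [PySem.Chars.findFrom]
  rw [if_neg h1, if_pos h2]

-- termination helper for port A's loop (cited by decreasing_by): a found star lies in [start, length)
theorem pvFindStarBounds (cs : List Char) (st : Int) (h0 : 0 ≤ st)
    (h : ¬ PySem.Chars.findFrom cs ['*'] st none < 0) :
    st ≤ PySem.Chars.findFrom cs ['*'] st none ∧
      PySem.Chars.findFrom cs ['*'] st none < cs.length := by
  lift st to Nat using h0 with m
  by_cases hm : m ≤ cs.length
  · rw [pvFindFrom_star cs m hm] at h ⊢
    by_cases hmem : '*' ∈ cs.drop m
    · simp only [hmem, if_true]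
      have h1 := List.idxOf_lt_length_of_mem hmem
      have h2 : (cs.drop m).length = cs.length - m := by simp
      constructor <;> omega
    · simp [hmem] at h
  · rw [pvFindFrom_star_none cs m (by omega)] at h
    omega

-- ===== PORT A =====
-- A's while-loop: state (i, ss); j = s.find('*', i); escape branch / strong branch / break.
def strongLoopA (cs : List Char) (i : Nat) (ss : List Char) : List Char :=
  let j : Int := PySem.Chars.findFrom cs ['*'] (i : Int) none
  if _hj : j < 0 then ss ++ PySem.Chars.slice cs (some (i : Int)) none   -- break; ss += s[i:]
  else if 0 < j ∧ PySem.List.pyGet? cs (j - 1) = some '\\' then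
    strongLoopA cs (j + 1).toNat (ss ++ PySem.Chars.slice cs (some (i : Int)) (some (j - 1)) ++ ['*'])
  else
    let k : Int := PySem.Chars.findFrom cs ['*'] (j + 1) none
    if _hk : k < 0 then ss ++ PySem.Chars.slice cs (some (i : Int)) none  -- break; ss += s[i:]
    else
      strongLoopA cs (k + 1).toNat
        (ss ++ PySem.Chars.slice cs (some (i : Int)) (some j) ++ "<strong>".toList
            ++ PySem.Chars.slice cs (some (j + 1)) (some k) ++ "</strong>".toList)
termination_by cs.length - i
decreasing_by
  · have h1 := pvFindStarBounds cs (i : Int) (by positivity) _hj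
    omega
  · have h1 := pvFindStarBounds cs (i : Int) (by positivity) _hj
    have h2 := pvFindStarBounds cs (PySem.Chars.findFrom cs ['*'] (i : Int) none + 1) (by omega) _hk
    omega

def strong (s : String) : String := String.ofList (strongLoopA s.toList 0 [])

-- ===== PORT B =====
-- Source B's while-loop: state (out, head, remaining segments); the index walk i / i+1 / i+2 over
-- parts becomes the obvious structural consumption of the remaining-segment list.
def strongGoIter (out : List Char) (head : List Char) (rest : List (List Char)) : List Char :=
  match rest with
  | [] => out ++ head                         -- out.append(head); ''.join(out)
  | p :: rest' =>
    if PySem.Chars.endswith head ['\\'] then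
      strongGoIter out (head.dropLast ++ '*' :: p) rest'     -- head = head[:-1] + '*' + parts[i]
    else
      match rest' with
      | [] => strongGoIter out (head ++ '*' :: p) []         -- i == n - 1: head = head + '*' + parts[i]
      | q :: rest'' =>
        strongGoIter (out ++ head ++ "<strong>".toList ++ p ++ "</strong>".toList) q rest''
termination_by rest.length

def strong_alt (s : String) : String :=
  match PySem.Chars.splitOn s.toList ['*'] with
  | [] => ""                                  -- unreachable: split('*') always returns at least one part
  | h :: rest => String.ofList (strongGoIter [] h rest)

-- ===== PRECONDITION & SPEC =====
def Spec_strong (s : String) (out : String) : Prop := out = strong_alt s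
instance (s : String) (out : String) : Decidable (Spec_strong s out) := by unfold Spec_strong; infer_instance

-- ===== CLAIM (what is proved, stated in full; the proofs are below) =====
def Claim_equal_strong : Prop := ∀ (s : String), Dom_strong s → Spec_strong s (strong s)

-- ===== LEMMAS AND PROOFS =====

-- A's loop, reformulated on the remaining suffix (proof helper)
def pvLoopS (t : List Char) : List Char :=
  if _h : '*' ∈ t then
    let j := List.idxOf '*' t
    if 0 < j ∧ t[j - 1]? = some '\\' then
      t.take (j - 1) ++ '*' :: pvLoopS (t.drop (j + 1))
    else
      let r := t.drop (j + 1)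
      if _h2 : '*' ∈ r then
        t.take j ++ "<strong>".toList ++ r.take (List.idxOf '*' r) ++ "</strong>".toList
          ++ pvLoopS (r.drop (List.idxOf '*' r + 1))
      else t
  else t
termination_by t.length
decreasing_by
  · have := List.idxOf_lt_length_of_mem _h
    simp [List.length_drop]; omega
  · have := List.idxOf_lt_length_of_mem _h
    simp [List.length_drop]; omega

-- the segment list split('*') produces (proof helper)
def pvParts (t : List Char) : List (List Char) :=
  if h : '*' ∈ t then t.take (List.idxOf '*' t) :: pvParts (t.drop (List.idxOf '*' t + 1)) else [t]
termination_by t.length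
decreasing_by
  have := List.idxOf_lt_length_of_mem h
  simp [List.length_drop]; omega

def pvConsHead (p : List Char) (ps : List (List Char)) : List (List Char) :=
  match ps with
  | [] => [p]
  | h :: t => (p ++ h) :: t

theorem pvParts_ne_nil (t : List Char) : pvParts t ≠ [] := by
  unfold pvParts; split <;> simp

theorem pvConsHead_append (x y : List Char) (ps : List (List Char)) :
    pvConsHead (x ++ y) ps = pvConsHead x (pvConsHead y ps) := by
  cases ps <;> simp [pvConsHead]

theorem pvConsHead_nil_of_ne (ps : List (List Char)) (h : ps ≠ []) : pvConsHead [] ps = ps := by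
  cases ps <;> simp_all [pvConsHead]

-- ---- splitOn '*' computes pvParts ----

theorem pvParts_nil : pvParts [] = [[]] := by rw [pvParts]; simp

theorem pvParts_cons_star (rest : List Char) : pvParts ('*' :: rest) = [] :: pvParts rest := by
  rw [pvParts]
  have hm : '*' ∈ '*' :: rest := List.mem_cons_self
  simp [hm]

theorem pvParts_cons_ne (c : Char) (rest : List Char) (hc : c ≠ '*') :
    pvParts (c :: rest) = pvConsHead [c] (pvParts rest) := by
  by_cases hm : '*' ∈ rest
  · have hm' : '*' ∈ c :: rest := List.mem_cons_of_mem _ hm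
    conv_lhs => rw [pvParts]
    conv_rhs => rw [pvParts]
    simp only [hm, hm', dif_pos, List.idxOf_cons, show (c == '*') = false by simp [hc],
      cond_false, List.take_succ_cons, List.drop_succ_cons, pvConsHead]
    simp
  · have hm' : ¬ '*' ∈ c :: rest := by simp [hm, Ne.symm hc]
    conv_lhs => rw [pvParts]
    conv_rhs => rw [pvParts]
    simp [hm, hm', pvConsHead]

theorem pvSplitGo_star (fuel : Nat) : ∀ (l cur : List Char) (acc : List (List Char)),
    l.length < fuel →
    PySem.Chars.splitOn.go ['*'] fuel l cur acc =
      acc.reverse ++ pvConsHead cur.reverse (pvParts l) := by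
  induction fuel with
  | zero => intro l cur acc h; exact absurd h (Nat.not_lt_zero _)
  | succ f ihf =>
    intro l cur acc h
    cases l with
    | nil =>
      simp [PySem.Chars.splitOn.go, pvParts_nil, pvConsHead]
    | cons c rest =>
      by_cases hc : c = '*'
      · subst hc
        rw [show PySem.Chars.splitOn.go ['*'] (f + 1) ('*' :: rest) cur acc
              = PySem.Chars.splitOn.go ['*'] f rest [] (cur.reverse :: acc) from by
          simp [PySem.Chars.splitOn.go, List.isPrefixOf]]
        rw [ihf rest [] (cur.reverse :: acc) (by simpa using Nat.lt_of_succ_lt_succ h)]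
        rw [pvParts_cons_star, List.reverse_nil, pvConsHead_nil_of_ne _ (pvParts_ne_nil rest)]
        simp [pvConsHead]
      · rw [show PySem.Chars.splitOn.go ['*'] (f + 1) (c :: rest) cur acc
              = PySem.Chars.splitOn.go ['*'] f rest (c :: cur) acc from by
          simp [PySem.Chars.splitOn.go, List.isPrefixOf, Ne.symm hc]]
        rw [ihf rest (c :: cur) acc (by simpa using Nat.lt_of_succ_lt_succ h)]
        rw [pvParts_cons_ne c rest hc, List.reverse_cons, pvConsHead_append]

theorem pvSplitOn_eq_parts (t : List Char) :
    PySem.Chars.splitOn t ['*'] = pvParts t := by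
  unfold PySem.Chars.splitOn
  rw [pvSplitGo_star (t.length + 1) t [] [] (by omega)]
  simp [pvConsHead_nil_of_ne _ (pvParts_ne_nil t)]

-- ---- endswith('\\') facts ----

theorem pvLast_suffix (p : List Char) (c : Char) : [c] <:+ p ↔ p.getLast? = some c := by
  constructor
  · rintro ⟨r, rfl⟩; simp
  · intro h
    rcases List.eq_nil_or_concat p with rfl | ⟨q, d, rfl⟩
    · simp at h
    · simp only [List.concat_eq_append, List.getLast?_concat, Option.some.injEq] at h
      subst h
      exact ⟨q, by simp⟩

theorem pvEnds_iff (p : List Char) :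
    PySem.Chars.endswith p ['\\'] = true ↔ p.getLast? = some '\\' :=
  (PySem.Chars.endswith_iff p ['\\']).trans (pvLast_suffix p '\\')

theorem pvEnds_append (x p1 : List Char) (h : p1 ≠ []) :
    PySem.Chars.endswith (x ++ p1) ['\\'] = PySem.Chars.endswith p1 ['\\'] := by
  rw [Bool.eq_iff_iff, pvEnds_iff, pvEnds_iff, List.getLast?_append_of_ne_nil _ h]

theorem pvEnds_concat_star (x : List Char) :
    PySem.Chars.endswith (x ++ ['*']) ['\\'] = false := by
  rw [← Bool.not_eq_true, pvEnds_iff]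
  simp

-- ---- Source B's loop: recursive form and its unfolding equations ----

-- Source B's segment-consumption, in recursive form (proof helper; strongGoIter is its accumulator version)
def strongGoB (parts : List (List Char)) : List Char :=
  match parts with
  | [] => []
  | [p] => p
  | h :: p1 :: rest =>
    if PySem.Chars.endswith h ['\\'] then
      strongGoB ((h.dropLast ++ '*' :: p1) :: rest)
    else
      match rest with
      | [] => h ++ '*' :: p1
      | q :: rest' => h ++ "<strong>".toList ++ p1 ++ "</strong>".toList ++ strongGoB (q :: rest')
termination_by parts.length

theorem pvGoB_single (p : List Char) : strongGoB [p] = p := by rw [strongGoB.eq_def]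

theorem pvGoB_merge (h p1 : List Char) (rest : List (List Char))
    (hE : PySem.Chars.endswith h ['\\'] = true) :
    strongGoB (h :: p1 :: rest) = strongGoB ((h.dropLast ++ '*' :: p1) :: rest) := by
  conv_lhs => rw [strongGoB.eq_def]
  simp [hE]

theorem pvGoB_two (h p1 : List Char) (hE : PySem.Chars.endswith h ['\\'] = false) :
    strongGoB [h, p1] = h ++ '*' :: p1 := by
  conv_lhs => rw [strongGoB.eq_def]
  simp [hE]

theorem pvGoB_strong (h p1 q : List Char) (rest : List (List Char))
    (hE : PySem.Chars.endswith h ['\\'] = false) :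
    strongGoB (h :: p1 :: q :: rest)
      = h ++ "<strong>".toList ++ p1 ++ "</strong>".toList ++ strongGoB (q :: rest) := by
  conv_lhs => rw [strongGoB.eq_def]
  simp [hE]

theorem pvGoB_prefix (rest : List (List Char)) (p p1 : List Char)
    (hp : PySem.Chars.endswith p ['\\'] = false) :
    strongGoB ((p ++ p1) :: rest) = p ++ strongGoB (p1 :: rest) := by
  induction rest generalizing p1 with
  | nil => rw [pvGoB_single, pvGoB_single]
  | cons q rest' ih =>
    cases h1 : PySem.Chars.endswith p1 ['\\'] with
    | true =>
      have hp1ne : p1 ≠ [] := by rintro rfl; exact absurd h1 (by decide)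
      have h2 : PySem.Chars.endswith (p ++ p1) ['\\'] = true := by
        rw [pvEnds_append p p1 hp1ne]; exact h1
      rw [pvGoB_merge _ _ _ h2, pvGoB_merge _ _ _ h1,
        List.dropLast_append_of_ne_nil hp1ne, List.append_assoc]
      exact ih (p1.dropLast ++ '*' :: q)
    | false =>
      have h2 : PySem.Chars.endswith (p ++ p1) ['\\'] = false := by
        rcases eq_or_ne p1 [] with rfl | hne
        · simpa using hp
        · rw [pvEnds_append p p1 hne]; exact h1
      cases rest' with
      | nil => rw [pvGoB_two _ _ h2, pvGoB_two _ _ h1]; simp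
      | cons q' rest'' =>
        rw [pvGoB_strong _ _ _ _ h2, pvGoB_strong _ _ _ _ h1]; simp

-- the accumulator loop of the port computes the recursive form
theorem pvIter_nil (out head : List Char) : strongGoIter out head [] = out ++ head := by
  rw [strongGoIter.eq_def]

theorem pvIter_merge (out head p : List Char) (rest' : List (List Char))
    (hE : PySem.Chars.endswith head ['\\'] = true) :
    strongGoIter out head (p :: rest') = strongGoIter out (head.dropLast ++ '*' :: p) rest' := by
  conv_lhs => rw [strongGoIter.eq_def]
  simp [hE]

theorem pvIter_last (out head p : List Char)
    (hE : PySem.Chars.endswith head ['\\'] = false) :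
    strongGoIter out head [p] = strongGoIter out (head ++ '*' :: p) [] := by
  conv_lhs => rw [strongGoIter.eq_def]
  simp [hE]

theorem pvIter_strong (out head p q : List Char) (rest'' : List (List Char))
    (hE : PySem.Chars.endswith head ['\\'] = false) :
    strongGoIter out head (p :: q :: rest'')
      = strongGoIter (out ++ head ++ "<strong>".toList ++ p ++ "</strong>".toList) q rest'' := by
  conv_lhs => rw [strongGoIter.eq_def]
  simp [hE]

theorem pvGoIter_eq_goB_aux : ∀ (n : Nat) (rest : List (List Char)) (head out : List Char),
    rest.length ≤ n → strongGoIter out head rest = out ++ strongGoB (head :: rest) := by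
  intro n
  induction n with
  | zero =>
    intro rest head out hlen
    have h0 : rest = [] := List.eq_nil_of_length_eq_zero (Nat.le_zero.mp hlen)
    subst h0
    rw [pvIter_nil, pvGoB_single]
  | succ n ih =>
    intro rest head out hlen
    cases rest with
    | nil => rw [pvIter_nil, pvGoB_single]
    | cons p rest' =>
      cases hE : PySem.Chars.endswith head ['\\'] with
      | true =>
        rw [pvIter_merge out head p rest' hE, ih rest' _ out (by simpa using Nat.le_of_succ_le_succ (by simpa using hlen)),
          pvGoB_merge head p rest' hE]
      | false =>
        cases rest' with
        | nil =>
          rw [pvIter_last out head p hE, pvIter_nil, pvGoB_two head p hE]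
        | cons q rest'' =>
          rw [pvIter_strong out head p q rest'' hE,
            ih rest'' q _ (by simp at hlen ⊢; omega),
            pvGoB_strong head p q rest'' hE]
          simp

theorem pvGoIter_eq_goB (rest : List (List Char)) (head out : List Char) :
    strongGoIter out head rest = out ++ strongGoB (head :: rest) :=
  pvGoIter_eq_goB_aux rest.length rest head out le_rfl

-- ---- unfolding equations for pvLoopS / main correspondence ----

theorem pvLoopS_no (t : List Char) (hm : '*' ∉ t) : pvLoopS t = t := by
  rw [pvLoopS]; simp [hm]

theorem pvLoopS_esc (t : List Char) (hm : '*' ∈ t)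
    (hesc : 0 < List.idxOf '*' t ∧ t[List.idxOf '*' t - 1]? = some '\\') :
    pvLoopS t = t.take (List.idxOf '*' t - 1) ++ '*' :: pvLoopS (t.drop (List.idxOf '*' t + 1)) := by
  rw [pvLoopS]; simp [hm, hesc]

theorem pvLoopS_strong (t : List Char) (hm : '*' ∈ t)
    (hesc : ¬ (0 < List.idxOf '*' t ∧ t[List.idxOf '*' t - 1]? = some '\\'))
    (hmr : '*' ∈ t.drop (List.idxOf '*' t + 1)) :
    pvLoopS t = t.take (List.idxOf '*' t) ++ "<strong>".toList
      ++ (t.drop (List.idxOf '*' t + 1)).take (List.idxOf '*' (t.drop (List.idxOf '*' t + 1)))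
      ++ "</strong>".toList
      ++ pvLoopS ((t.drop (List.idxOf '*' t + 1)).drop
            (List.idxOf '*' (t.drop (List.idxOf '*' t + 1)) + 1)) := by
  rw [pvLoopS]; simp [hm, hesc, hmr]

theorem pvLoopS_unclosed (t : List Char) (hm : '*' ∈ t)
    (hesc : ¬ (0 < List.idxOf '*' t ∧ t[List.idxOf '*' t - 1]? = some '\\'))
    (hmr : '*' ∉ t.drop (List.idxOf '*' t + 1)) :
    pvLoopS t = t := by
  rw [pvLoopS]; simp [hm, hesc, hmr]

theorem pvParts_mem (t : List Char) (hm : '*' ∈ t) :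
    pvParts t = t.take (List.idxOf '*' t) :: pvParts (t.drop (List.idxOf '*' t + 1)) := by
  rw [pvParts]; simp [hm]

theorem pvParts_no (t : List Char) (hm : '*' ∉ t) : pvParts t = [t] := by
  rw [pvParts]; simp [hm]

theorem pvLoopS_eq_goB_aux : ∀ (n : Nat) (t : List Char), t.length ≤ n →
    pvLoopS t = strongGoB (pvParts t) := by
  intro n
  induction n with
  | zero =>
    intro t ht
    have h0 : t = [] := List.eq_nil_of_length_eq_zero (Nat.le_zero.mp ht)
    subst h0
    rw [pvLoopS_no _ (by simp), pvParts_nil, pvGoB_single]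
  | succ n ih =>
    intro t ht
    by_cases hm : '*' ∈ t
    · set j := List.idxOf '*' t with hj
      have hjlt : j < t.length := List.idxOf_lt_length_of_mem hm
      have hget : t[j] = '*' := List.getElem_idxOf hjlt
      set a := t.take j with ha
      set r := t.drop (j + 1) with hr
      have hrlen : r.length = t.length - (j + 1) := by simp [hr]
      have hstruct : t = a ++ '*' :: r := by
        conv_lhs => rw [← List.take_append_drop j t]
        rw [List.drop_eq_getElem_cons hjlt, hget]
      have halen : a.length = j := by simp [ha]; omega
      have hparts : pvParts t = a :: pvParts r := pvParts_mem t hm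
      obtain ⟨p1, rest, hpr⟩ : ∃ p1 rest, pvParts r = p1 :: rest := by
        rcases hx : pvParts r with _ | ⟨p1, rest⟩
        · exact absurd hx (pvParts_ne_nil r)
        · exact ⟨p1, rest, rfl⟩
      by_cases hesc : 0 < j ∧ t[j - 1]? = some '\\'
      · -- escaped star: A drops the backslash and keeps the star
        have hEa : PySem.Chars.endswith a ['\\'] = true := by
          rw [pvEnds_iff, List.getLast?_eq_getElem?, halen, ha, List.getElem?_take,
            if_pos (by omega)]
          exact hesc.2
        have h5 : a.dropLast = t.take (j - 1) := by
          rw [List.dropLast_eq_take, halen, ha, List.take_take]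
          congr 1
          omega
        have hIH : pvLoopS r = strongGoB (pvParts r) := ih r (by omega)
        calc pvLoopS t = a.dropLast ++ '*' :: pvLoopS r := by
              rw [pvLoopS_esc t hm hesc, h5]
          _ = (a.dropLast ++ ['*']) ++ strongGoB (p1 :: rest) := by
              rw [hIH, hpr]; simp
          _ = strongGoB (((a.dropLast ++ ['*']) ++ p1) :: rest) :=
              (pvGoB_prefix rest (a.dropLast ++ ['*']) p1 (pvEnds_concat_star _)).symm
          _ = strongGoB (a :: p1 :: rest) := by
              rw [pvGoB_merge a p1 rest hEa]
              congr 1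
              simp
          _ = strongGoB (pvParts t) := by rw [hparts, hpr]
      · have hEa : PySem.Chars.endswith a ['\\'] = false := by
          rw [← Bool.not_eq_true, pvEnds_iff]
          intro hlast
          apply hesc
          rcases Nat.eq_zero_or_pos j with h0 | hpos
          · rw [ha, h0] at hlast; simp at hlast
          · refine ⟨hpos, ?_⟩
            rw [List.getLast?_eq_getElem?, halen, ha, List.getElem?_take,
              if_pos (by omega)] at hlast
            exact hlast
        by_cases hmr : '*' ∈ r
        · set jr := List.idxOf '*' r with hjr
          have hjrlt : jr < r.length := List.idxOf_lt_length_of_mem hmr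
          have hparts_r : pvParts r = r.take jr :: pvParts (r.drop (jr + 1)) := pvParts_mem r hmr
          obtain ⟨q, rest2, hq⟩ : ∃ q rest2, pvParts (r.drop (jr + 1)) = q :: rest2 := by
            rcases hx : pvParts (r.drop (jr + 1)) with _ | ⟨q, rest2⟩
            · exact absurd hx (pvParts_ne_nil _)
            · exact ⟨q, rest2, rfl⟩
          have hIH2 : pvLoopS (r.drop (jr + 1)) = strongGoB (pvParts (r.drop (jr + 1))) := by
            apply ih
            have : (r.drop (jr + 1)).length = r.length - (jr + 1) := by simp
            omega
          rw [pvLoopS_strong t hm hesc hmr, hparts, hparts_r, hq]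
          rw [pvGoB_strong _ _ _ _ hEa]
          rw [← hq, ← hIH2]
        · rw [pvLoopS_unclosed t hm hesc hmr, hparts, pvParts_no r hmr,
            pvGoB_two a r hEa]
          exact hstruct
    · rw [pvLoopS_no t hm, pvParts_no t hm, pvGoB_single]

theorem pvLoopS_eq_goB (t : List Char) : pvLoopS t = strongGoB (pvParts t) :=
  pvLoopS_eq_goB_aux t.length t le_rfl

-- ---- A's port equals the suffix loop ----

theorem pvInv_le (cs : List Char) (i : Nat) (hinv : i = 0 ∨ cs[i - 1]? = some '*') :
    i ≤ cs.length := by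
  rcases hinv with rfl | hinv
  · exact Nat.zero_le _
  · have := (List.getElem?_eq_some_iff.mp hinv).1
    omega

-- the break case: no star at or after position i
theorem pvBridgeNoStar (cs : List Char) (i : Nat) (ss : List Char) (hile : i ≤ cs.length)
    (hm : '*' ∉ cs.drop i) :
    strongLoopA cs i ss = ss ++ pvLoopS (cs.drop i) := by
  have hfind : PySem.Chars.findFrom cs ['*'] (i : Int) none = -1 := by
    rw [pvFindFrom_star cs i hile]; simp [hm]
  rw [strongLoopA, hfind, pvLoopS_no _ hm]
  simp [PySem.List.slice_from_natCast]

theorem pvBridgeA : ∀ (n : Nat) (cs : List Char) (i : Nat) (ss : List Char),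
    cs.length - i ≤ n → (i = 0 ∨ cs[i - 1]? = some '*') →
    strongLoopA cs i ss = ss ++ pvLoopS (cs.drop i) := by
  intro n
  induction n with
  | zero =>
    intro cs i ss hlen hinv
    have hile := pvInv_le cs i hinv
    refine pvBridgeNoStar cs i ss hile ?_
    rw [List.drop_eq_nil_of_le (by omega)]
    simp
  | succ n ih =>
    intro cs i ss hlen hinv
    have hile := pvInv_le cs i hinv
    by_cases hm : '*' ∈ cs.drop i
    · have hdlen : (cs.drop i).length = cs.length - i := by simp
      set jr := List.idxOf '*' (cs.drop i) with hjr
      have hjrlt : jr < (cs.drop i).length := List.idxOf_lt_length_of_mem hm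
      have hchar : (cs.drop i)[jr] = '*' := List.getElem_idxOf hjrlt
      have hdropjr : (cs.drop i)[jr]? = some '*' := by
        rw [List.getElem?_eq_getElem hjrlt, hchar]
      have hcsjr : cs[i + jr]? = some '*' := by
        rw [← List.getElem?_drop]; exact hdropjr
      have hij_lt : i + jr < cs.length := by omega
      have hfind : PySem.Chars.findFrom cs ['*'] (i : Int) none = ((i + jr : Nat) : Int) := by
        rw [pvFindFrom_star cs i hile]
        rw [if_pos hm, ← hjr]
        push_cast; ring
      rw [strongLoopA]
      simp only [hfind]
      rw [dif_neg (by omega : ¬ ((i + jr : Nat) : Int) < 0)]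
      by_cases hesc : 0 < jr ∧ (cs.drop i)[jr - 1]? = some '\\'
      · -- escaped star
        have hC1 : 0 < ((i + jr : Nat) : Int) ∧
            PySem.List.pyGet? cs (((i + jr : Nat) : Int) - 1) = some '\\' := by
          refine ⟨by exact_mod_cast Nat.lt_of_lt_of_le hesc.1 (Nat.le_add_left _ _), ?_⟩
          rw [show (((i + jr : Nat) : Int) - 1) = ((i + jr - 1 : Nat) : Int) by
            have := hesc.1; omega]
          rw [PySem.List.pyGet?_natCast]
          rw [show i + jr - 1 = i + (jr - 1) by have := hesc.1; omega, ← List.getElem?_drop]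
          exact hesc.2
        rw [if_pos hC1]
        rw [show ((((i + jr : Nat) : Int)) + 1).toNat = i + jr + 1 by omega]
        have hslice : PySem.Chars.slice cs (some ((i : Nat) : Int)) (some (((i + jr : Nat) : Int) - 1))
            = (cs.drop i).take (jr - 1) := by
          rw [show (((i + jr : Nat) : Int) - 1) = ((i + jr - 1 : Nat) : Int) by push_cast; omega]
          rw [PySem.Chars.slice_eq_listSlice, PySem.List.slice_natCast]
          congr 1
          omega
        rw [hslice]
        have hinv' : i + jr + 1 = 0 ∨ cs[i + jr + 1 - 1]? = some '*' := by
          right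
          simpa using hcsjr
        rw [ih cs (i + jr + 1) _ (by omega) hinv']
        rw [pvLoopS_esc (cs.drop i) hm (by rw [← hjr]; exact hesc)]
        rw [← hjr]
        rw [show (cs.drop i).drop (jr + 1) = cs.drop (i + jr + 1) by
          rw [List.drop_drop]; congr 1]
        simp
      · -- not escaped: look for the closing star
        have hC1' : ¬ (0 < ((i + jr : Nat) : Int) ∧
            PySem.List.pyGet? cs (((i + jr : Nat) : Int) - 1) = some '\\') := by
          rintro ⟨h1, h2⟩
          rcases Nat.eq_zero_or_pos jr with h0 | hpos
          · rcases hinv with rfl | hstar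
            · omega
            · rw [show (((i + jr : Nat) : Int) - 1) = ((i - 1 : Nat) : Int) by omega] at h2
              rw [PySem.List.pyGet?_natCast, hstar] at h2
              simp at h2
          · apply hesc
            refine ⟨hpos, ?_⟩
            rw [show (((i + jr : Nat) : Int) - 1) = ((i + (jr - 1) : Nat) : Int) by omega] at h2
            rw [PySem.List.pyGet?_natCast] at h2
            rw [List.getElem?_drop]
            exact h2
        rw [if_neg hC1']
        have hb : i + jr + 1 ≤ cs.length := by omega
        have hfind2 : PySem.Chars.findFrom cs ['*'] (((i + jr : Nat) : Int) + 1) none =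
            if '*' ∈ cs.drop (i + jr + 1)
            then (((i + jr + 1 : Nat) : Int) + List.idxOf '*' (cs.drop (i + jr + 1))) else -1 := by
          rw [show (((i + jr : Nat) : Int) + 1) = ((i + jr + 1 : Nat) : Int) by omega]
          exact pvFindFrom_star cs (i + jr + 1) hb
        have hdropdrop : cs.drop (i + jr + 1) = (cs.drop i).drop (jr + 1) := by
          rw [List.drop_drop]; congr 1
        by_cases hmr : '*' ∈ (cs.drop i).drop (jr + 1)
        · -- closing star found
          set kr := List.idxOf '*' ((cs.drop i).drop (jr + 1)) with hkr
          have hkrlt : kr < ((cs.drop i).drop (jr + 1)).length := List.idxOf_lt_length_of_mem hmr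
          have hrlen : ((cs.drop i).drop (jr + 1)).length = cs.length - (i + jr + 1) := by
            simp; omega
          have hfind2' : PySem.Chars.findFrom cs ['*'] (((i + jr : Nat) : Int) + 1) none
              = ((i + jr + 1 + kr : Nat) : Int) := by
            rw [hfind2, hdropdrop, if_pos hmr, ← hkr]
            omega
          simp only [hfind2']
          rw [dif_neg (by omega : ¬ ((i + jr + 1 + kr : Nat) : Int) < 0)]
          rw [show ((((i + jr + 1 + kr : Nat) : Int)) + 1).toNat = i + jr + 1 + kr + 1 by omega]
          have hslice1 : PySem.Chars.slice cs (some ((i : Nat) : Int)) (some ((i + jr : Nat) : Int))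
              = (cs.drop i).take jr := by
            rw [PySem.Chars.slice_eq_listSlice, PySem.List.slice_natCast]
            congr 1
            omega
          have hslice2 : PySem.Chars.slice cs (some (((i + jr : Nat) : Int) + 1))
                (some ((i + jr + 1 + kr : Nat) : Int))
              = ((cs.drop i).drop (jr + 1)).take kr := by
            rw [show (((i + jr : Nat) : Int) + 1) = ((i + jr + 1 : Nat) : Int) by omega]
            rw [PySem.Chars.slice_eq_listSlice, PySem.List.slice_natCast, hdropdrop]
            congr 1
            omega
          rw [hslice1, hslice2]
          have hstar2 : cs[i + jr + 1 + kr]? = some '*' := by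
            have h9 : ((cs.drop i).drop (jr + 1))[kr]? = some '*' := by
              rw [List.getElem?_eq_getElem hkrlt]
              exact congrArg some (List.getElem_idxOf hkrlt)
            rw [← hdropdrop, List.getElem?_drop] at h9
            exact h9
          have hinv' : i + jr + 1 + kr + 1 = 0 ∨ cs[i + jr + 1 + kr + 1 - 1]? = some '*' := by
            right; simpa using hstar2
          rw [ih cs (i + jr + 1 + kr + 1) _ (by omega) hinv']
          rw [pvLoopS_strong (cs.drop i) hm (by rw [← hjr]; exact hesc)
            (by rw [← hjr]; exact hmr)]
          rw [← hjr, ← hkr]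
          rw [show ((cs.drop i).drop (jr + 1)).drop (kr + 1) = cs.drop (i + jr + 1 + kr + 1) by
            rw [List.drop_drop, List.drop_drop]; congr 1; omega]
          simp
        · -- no closing star: break
          have hfind2' : PySem.Chars.findFrom cs ['*'] (((i + jr : Nat) : Int) + 1) none = -1 := by
            rw [hfind2, hdropdrop, if_neg hmr]
          simp only [hfind2']
          rw [dif_pos (by norm_num : (-1 : Int) < 0)]
          rw [pvLoopS_unclosed (cs.drop i) hm (by rw [← hjr]; exact hesc)
            (by rw [← hjr]; exact hmr)]
          simp [PySem.List.slice_from_natCast]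
    · exact pvBridgeNoStar cs i ss hile hm

-- ===== VERDICT (by name: the statement is the Claim_ definition above) =====
theorem strong_spec : Claim_equal_strong := by
  intro s _
  unfold Spec_strong strong strong_alt
  have h := pvBridgeA s.toList.length s.toList 0 [] (by omega) (Or.inl rfl)
  rw [h]
  rcases hx : PySem.Chars.splitOn s.toList ['*'] with _ | ⟨h0, rest⟩
  · exact absurd (hx.symm.trans (pvSplitOn_eq_parts s.toList)) (Ne.symm (pvParts_ne_nil _))
  · dsimp only
    rw [pvGoIter_eq_goB rest h0 []]
    have hp : pvParts s.toList = h0 :: rest := by rw [← pvSplitOn_eq_parts, hx]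
    simp [pvLoopS_eq_goB, hp]
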